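-- pv_equiv track=rewrite | github.com/yanglilei/webAutomationFramework | src/frame/common/question_bank/base_question_bank.py | answer_str_2_tuple
-- ===== SOURCE A (Python) =====
-- def answer_str_2_tuple(answer_str: str):
--     ret = ()
--     if answer_str is not None and len(answer_str) > 0:
--         answer_list = answer_str.split(",")
--         for answer in answer_list:
--             if len(answer) > 0 and 65 <= ord(answer[0]) <= 90:
--                 ret = tuple(answer)
--             else:
--                 ret = (answer,)
--     return ret
-- ===== SOURCE B (Python) =====
-- def answer_str_2_tuple(answer_str: str):
--     # Loop-free: only the last comma-delimited segment determines the result.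
--     if not answer_str:
--         return ()
--     seg = answer_str.split(",")[-1]
--     if seg and "A" <= seg[0] <= "Z":
--         return tuple(seg)
--     return (seg,)
-- ===== Notes on version B (the rewrite author's own statement) =====
-- stated objective: simpler
-- what changed: Replaces the loop that overwrites its result on every segment with a direct computation on the single segment that survives (the last one), using early returns instead of an accumulator.
import Mathlib
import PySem

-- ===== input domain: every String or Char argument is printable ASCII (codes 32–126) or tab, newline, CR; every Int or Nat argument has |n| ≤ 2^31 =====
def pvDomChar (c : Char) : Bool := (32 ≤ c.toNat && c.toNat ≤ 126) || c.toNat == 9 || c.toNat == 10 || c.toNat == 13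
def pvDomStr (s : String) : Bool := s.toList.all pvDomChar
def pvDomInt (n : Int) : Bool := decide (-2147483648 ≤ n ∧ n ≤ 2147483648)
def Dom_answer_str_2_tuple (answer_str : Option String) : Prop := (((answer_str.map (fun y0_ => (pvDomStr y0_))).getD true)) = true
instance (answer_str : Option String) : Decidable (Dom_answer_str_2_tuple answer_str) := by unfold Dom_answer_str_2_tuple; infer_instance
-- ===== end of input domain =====

-- B replaces A's overwrite-each-pass loop with a direct computation on the last comma-delimited segment (simpler decomposition, same cost).
-- ===== PORT A =====
-- conv answer : tuple(answer) if it starts with an uppercase letter, else (answer,)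
def pvConv (answer : String) : List String :=
  match answer.toList with
  | c :: _ =>
    if 65 ≤ c.toNat ∧ c.toNat ≤ 90 then answer.toList.map (fun ch => String.ofList [ch])
    else [answer]
  | [] => [answer]

def answer_str_2_tuple (answer_str : Option String) : List String :=
  match answer_str with
  | none => []
  | some s =>
    if s.toList.length > 0 then
      -- split? with "," is always some; getD [] is never taken
      ((PySem.Str.split? s ",").getD []).foldl (fun _ret answer => pvConv answer) []
    else []

-- ===== PORT B =====
def answer_str_2_tuple_alt (answer_str : Option String) : List String :=
  match answer_str with
  | none => []
  | some s =>
    if s.toList.length = 0 then []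
    else
      -- xs[-1]: split of a string by "," is never empty, so getLastD is exact
      let seg := ((PySem.Str.split? s ",").getD []).getLastD ""
      match seg.toList with
      | c :: _ =>
        if 65 ≤ c.toNat ∧ c.toNat ≤ 90 then seg.toList.map (fun ch => String.ofList [ch])
        else [seg]
      | [] => [seg]

-- ===== PRECONDITION & SPEC =====
def Spec_answer_str_2_tuple (answer_str : Option String) (out : List String) : Prop := out = answer_str_2_tuple_alt answer_str
instance (answer_str : Option String) (out : List String) : Decidable (Spec_answer_str_2_tuple answer_str out) := by unfold Spec_answer_str_2_tuple; infer_instance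

-- ===== CLAIM (what is proved, stated in full; the proofs are below) =====
def Claim_equal_answer_str_2_tuple : Prop := ∀ (answer_str : Option String), Dom_answer_str_2_tuple answer_str → Spec_answer_str_2_tuple answer_str (answer_str_2_tuple answer_str)

-- ===== LEMMAS AND PROOFS =====
theorem pv_foldl_const {α β : Type} (f : α → β) (init : β) (l : List α) (h : l ≠ []) :
    l.foldl (fun _ a => f a) init = f (l.getLast h) := by
  induction l generalizing init with
  | nil => exact absurd rfl h
  | cons x xs ih =>
    cases xs with
    | nil => simp
    | cons y ys => simpa using ih (f x) (by simp)

theorem pv_splitOn_go_ne_nil (sep : List Char) (fuel : Nat) (l cur : List Char)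
    (acc : List (List Char)) : PySem.Chars.splitOn.go sep fuel l cur acc ≠ [] := by
  induction fuel generalizing l cur acc with
  | zero => simp [PySem.Chars.splitOn.go]
  | succ n ih =>
    cases l with
    | nil => simp [PySem.Chars.splitOn.go]
    | cons c rest =>
      rw [PySem.Chars.splitOn.go]
      split
      · exact ih _ _ _
      · exact ih _ _ _

theorem pv_split_ne_nil (s : String) : (PySem.Str.split? s ",").getD [] ≠ [] := by
  have h := pv_splitOn_go_ne_nil ",".toList (s.toList.length + 1) s.toList [] []
  unfold PySem.Str.split? PySem.Chars.split?
  rw [if_neg (by decide)]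
  unfold PySem.Chars.splitOn
  simp only [Option.map_some, Option.getD_some, ne_eq, List.map_eq_nil_iff]
  exact h

-- ===== VERDICT (by name: the statement is the Claim_ definition above) =====
theorem answer_str_2_tuple_spec : Claim_equal_answer_str_2_tuple := by
  intro answer_str _
  unfold Spec_answer_str_2_tuple answer_str_2_tuple answer_str_2_tuple_alt
  match answer_str with
  | none => rfl
  | some s =>
    by_cases hlen : s.toList.length = 0
    · simp [hlen]
    · have hne := pv_split_ne_nil s
      simp only [hlen, if_pos (Nat.pos_of_ne_zero hlen)]
      rw [pv_foldl_const pvConv [] _ hne]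
      rw [List.getLastD_eq_getLast?, List.getLast?_eq_some_getLast hne, Option.getD_some]
      rfl
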